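-- pv_equiv track=rewrite | github.com/brkwok/usaco | lamps/lamps.py | click_button
-- ===== SOURCE A (Python) =====
-- def click_button(button, lamps):
--     if button == 1:
--         return [not x for x in lamps]
--     elif button == 2:
--         return [not x if i%2 ==0 else x for i, x in enumerate(lamps)]
--     elif button == 3:
--         return [not x if i % 2 == 1 else x for i,x in enumerate(lamps)]
--     else:
--         return [not x if i % 3 == 0 else x for i,x in enumerate(lamps)]
-- ===== SOURCE B (Python) =====
-- def click_button(button, lamps):
--     # cycling toggle-mask: walk the lamps once while cycling a boolean mask,
--     # flipping a lamp exactly when the current mask entry is True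
--     pattern = {1: [True], 2: [True, False], 3: [False, True]}.get(button, [True, False, False])
--     out = []
--     i = 0
--     for x in lamps:
--         out.append(not x if pattern[i] else x)
--         i += 1
--         if i == len(pattern):
--             i = 0
--     return out
-- ===== Notes on version B (the rewrite author's own statement) =====
-- stated objective: alternative
-- what changed: Replaced the four per-button enumerate passes with index-modulus tests by one pass that cycles a per-button boolean toggle mask with a wrap-around counter, removing enumerate and all modulus arithmetic from the loop.
import Mathlib
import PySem

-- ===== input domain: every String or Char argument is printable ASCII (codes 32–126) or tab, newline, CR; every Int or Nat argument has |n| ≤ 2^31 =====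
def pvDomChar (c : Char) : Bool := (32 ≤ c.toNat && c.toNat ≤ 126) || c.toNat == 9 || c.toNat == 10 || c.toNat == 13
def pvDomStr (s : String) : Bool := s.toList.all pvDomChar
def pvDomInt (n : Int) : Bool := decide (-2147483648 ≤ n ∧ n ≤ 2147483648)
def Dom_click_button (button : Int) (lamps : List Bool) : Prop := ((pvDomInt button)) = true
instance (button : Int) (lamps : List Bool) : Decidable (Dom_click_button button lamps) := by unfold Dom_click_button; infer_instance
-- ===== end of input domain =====

-- B replaces A's four enumerate-with-modulus passes by one pass that cycles a per-button
-- boolean toggle mask with a wrap-around counter: an alternative decomposition, same cost.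

-- ===== PORT A =====
def click_button (button : Int) (lamps : List Bool) : List Bool :=
  if button == 1 then
    lamps.map (fun x => !x)
  else if button == 2 then
    (PySem.List.enumerate lamps).map (fun p => if PySem.Int.mod p.1 2 == 0 then !p.2 else p.2)
  else if button == 3 then
    (PySem.List.enumerate lamps).map (fun p => if PySem.Int.mod p.1 2 == 1 then !p.2 else p.2)
  else
    (PySem.List.enumerate lamps).map (fun p => if PySem.Int.mod p.1 3 == 0 then !p.2 else p.2)

-- ===== PORT B =====
-- the dict literal {1:[True], 2:[True,False], 3:[False,True]}
def pvMasks : PySem.Dict Int (List Bool) :=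
  PySem.Dict.ofList [(1, [true]), (2, [true, false]), (3, [false, true])]

-- the for-loop of Source B: build out by cycling counter i through pattern
-- (pattern[i] is always in range here, 0 ≤ i < len(pattern), so getD is exact)
def pvCycle (pattern : List Bool) : Nat → List Bool → List Bool
  | _, [] => []
  | i, x :: xs =>
    (if pattern.getD i false then !x else x) ::
      pvCycle pattern (if i + 1 == pattern.length then 0 else i + 1) xs

def click_button_alt (button : Int) (lamps : List Bool) : List Bool :=
  let pattern := pvMasks.getD button [true, false, false]
  pvCycle pattern 0 lamps

-- ===== PRECONDITION & SPEC =====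
def Spec_click_button (button : Int) (lamps : List Bool) (out : List Bool) : Prop := out = click_button_alt button lamps
instance (button : Int) (lamps : List Bool) (out : List Bool) : Decidable (Spec_click_button button lamps out) := by unfold Spec_click_button; infer_instance

-- ===== CLAIM (what is proved, stated in full; the proofs are below) =====
def Claim_equal_click_button : Prop := ∀ (button : Int) (lamps : List Bool), Dom_click_button button lamps → Spec_click_button button lamps (click_button button lamps)

-- ===== LEMMAS AND PROOFS =====

theorem pvMasks_one : pvMasks.getD 1 [true, false, false] = [true] := by decide
theorem pvMasks_two : pvMasks.getD 2 [true, false, false] = [true, false] := by decide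
theorem pvMasks_three : pvMasks.getD 3 [true, false, false] = [false, true] := by decide
theorem pvMasks_other (b : Int) (h1 : b ≠ 1) (h2 : b ≠ 2) (h3 : b ≠ 3) :
    pvMasks.getD b [true, false, false] = [true, false, false] := by
  have hE : pvMasks = PySem.Dict.mk [(1, [true]), (2, [true, false]), (3, [false, true])] := by decide
  rw [hE]
  simp [PySem.Dict.getD, PySem.Dict.get?, Ne.symm h1, Ne.symm h2, Ne.symm h3]

theorem pvCycle_one (xs : List Bool) : pvCycle [true] 0 xs = xs.map (fun x => !x) := by
  induction xs with
  | nil => rfl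
  | cons x xs ih => simp [pvCycle, ih]

theorem pvCycle_two (xs : List Bool) (n : Nat) :
    pvCycle [true, false] (n % 2) xs =
      (PySem.List.enumerate xs (n : Int)).map
        (fun p => if PySem.Int.mod p.1 2 == 0 then !p.2 else p.2) := by
  induction xs generalizing n with
  | nil => simp [pvCycle, PySem.List.enumerate_nil]
  | cons x xs ih =>
    have hcast : ((n : Int) + 1) = ((n + 1 : Nat) : Int) := by push_cast; ring
    rw [PySem.List.enumerate_cons]
    rcases (show n % 2 = 0 ∨ n % 2 = 1 by omega) with h | h
    · have ih' := ih (n+1)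
      rw [show (n+1)%2 = 1 by omega] at ih'
      rw [hcast]
      simp [pvCycle, h, ih']
      all_goals omega
    · have ih' := ih (n+1)
      rw [show (n+1)%2 = 0 by omega] at ih'
      rw [hcast]
      simp [pvCycle, h, ih']
      all_goals omega

theorem pvCycle_three (xs : List Bool) (n : Nat) :
    pvCycle [false, true] (n % 2) xs =
      (PySem.List.enumerate xs (n : Int)).map
        (fun p => if PySem.Int.mod p.1 2 == 1 then !p.2 else p.2) := by
  induction xs generalizing n with
  | nil => simp [pvCycle, PySem.List.enumerate_nil]
  | cons x xs ih =>
    have hcast : ((n : Int) + 1) = ((n + 1 : Nat) : Int) := by push_cast; ring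
    rw [PySem.List.enumerate_cons]
    rcases (show n % 2 = 0 ∨ n % 2 = 1 by omega) with h | h
    · have ih' := ih (n+1)
      rw [show (n+1)%2 = 1 by omega] at ih'
      rw [hcast]
      simp [pvCycle, h, ih']
      all_goals omega
    · have ih' := ih (n+1)
      rw [show (n+1)%2 = 0 by omega] at ih'
      rw [hcast]
      simp [pvCycle, h, ih']
      all_goals omega

theorem pvCycle_other (xs : List Bool) (n : Nat) :
    pvCycle [true, false, false] (n % 3) xs =
      (PySem.List.enumerate xs (n : Int)).map
        (fun p => if PySem.Int.mod p.1 3 == 0 then !p.2 else p.2) := by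
  induction xs generalizing n with
  | nil => simp [pvCycle, PySem.List.enumerate_nil]
  | cons x xs ih =>
    have hcast : ((n : Int) + 1) = ((n + 1 : Nat) : Int) := by push_cast; ring
    rw [PySem.List.enumerate_cons]
    rcases (show n % 3 = 0 ∨ n % 3 = 1 ∨ n % 3 = 2 by omega) with h | h | h
    · have ih' := ih (n+1)
      rw [show (n+1)%3 = 1 by omega] at ih'
      rw [hcast]
      simp [pvCycle, h, ih']
      all_goals omega
    · have ih' := ih (n+1)
      rw [show (n+1)%3 = 2 by omega] at ih'
      rw [hcast]
      simp [pvCycle, h, ih']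
      all_goals omega
    · have ih' := ih (n+1)
      rw [show (n+1)%3 = 0 by omega] at ih'
      rw [hcast]
      simp [pvCycle, h, ih']
      all_goals omega

-- ===== VERDICT (by name: the statement is the Claim_ definition above) =====
theorem click_button_spec : Claim_equal_click_button := by
  intro b lamps _
  unfold Spec_click_button click_button click_button_alt
  by_cases h1 : b = 1
  · subst h1
    simp [pvMasks_one, pvCycle_one]
  · by_cases h2 : b = 2
    · subst h2
      simpa [pvMasks_two, h1] using (pvCycle_two lamps 0).symm
    · by_cases h3 : b = 3
      · subst h3
        simpa [pvMasks_three, h1, h2] using (pvCycle_three lamps 0).symm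
      · simpa [pvMasks_other b h1 h2 h3, h1, h2, h3] using (pvCycle_other lamps 0).symm
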